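-- pv_equiv track=rewrite | github.com/meatsby/Algorithm | programmers/lv1/82612.py | solution
-- ===== SOURCE A (Python) =====
-- def solution(price, money, count):
--     result = 0
--     for i in range(1, count+1):
--         result += i*price
--     answer = result - money
--     if answer < 0:
--         answer = 0
--
--     return answer
-- ===== SOURCE B (Python) =====
-- def solution(price, money, count):
--     n = count if count > 0 else 0
--     return max(price * n * (n + 1) // 2 - money, 0)
-- ===== Notes on version B (the rewrite author's own statement) =====
-- stated objective: faster
-- what changed: Replaces the O(count) accumulation loop with the closed-form arithmetic-series formula price*n*(n+1)//2 and a max-clamp.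
import Mathlib
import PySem

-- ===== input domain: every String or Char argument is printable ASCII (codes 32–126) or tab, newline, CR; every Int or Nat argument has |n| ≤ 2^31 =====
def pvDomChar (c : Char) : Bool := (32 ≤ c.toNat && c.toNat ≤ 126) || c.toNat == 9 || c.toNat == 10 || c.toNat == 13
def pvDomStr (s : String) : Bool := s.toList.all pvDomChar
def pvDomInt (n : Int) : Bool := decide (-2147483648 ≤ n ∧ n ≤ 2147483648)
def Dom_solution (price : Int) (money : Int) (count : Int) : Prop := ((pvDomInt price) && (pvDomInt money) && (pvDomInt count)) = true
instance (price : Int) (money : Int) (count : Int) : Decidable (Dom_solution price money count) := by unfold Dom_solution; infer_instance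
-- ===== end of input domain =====

-- B replaces A's O(count) accumulation loop with the closed-form series price*n*(n+1)//2 (asymptotically faster).


-- ===== PORT A =====
def solution (price : Int) (money : Int) (count : Int) : Int :=
  let result := (PySem.List.pyRange 1 (count + 1) 1).foldl (fun r i => r + i * price) 0
  let answer := result - money
  if answer < 0 then 0 else answer

-- ===== PORT B =====
def solution_alt (price : Int) (money : Int) (count : Int) : Int :=
  let n := if count > 0 then count else 0
  max (PySem.Int.floordiv (price * n * (n + 1)) 2 - money) 0

-- ===== PRECONDITION & SPEC =====
def Spec_solution (price : Int) (money : Int) (count : Int) (out : Int) : Prop := out = solution_alt price money count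
instance (price : Int) (money : Int) (count : Int) (out : Int) : Decidable (Spec_solution price money count out) := by unfold Spec_solution; infer_instance

-- ===== CLAIM (what is proved, stated in full; the proofs are below) =====
def Claim_equal_solution : Prop := ∀ (price : Int) (money : Int) (count : Int), Dom_solution price money count → Spec_solution price money count (solution price money count)

-- ===== LEMMAS AND PROOFS =====

-- A's loop accumulates the arithmetic series: twice the fold equals p*n*(n+1)
lemma two_mul_fold (p : Int) (n : Nat) :
    2 * ((PySem.List.pyRange 1 ((n : Int) + 1) 1).foldl (fun r i => r + i * p) 0)
      = p * (n : Int) * ((n : Int) + 1) := by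
  induction n with
  | zero => simp [PySem.List.pyRange_one_eq_nil]
  | succ k ih =>
    have h : PySem.List.pyRange 1 ((k : Int) + 1 + 1) 1
        = PySem.List.pyRange 1 ((k : Int) + 1) 1 ++ [(k : Int) + 1] :=
      PySem.List.pyRange_one_succ_right (by omega)
    push_cast
    rw [show ((k : Int) + 1 + 1) = ((k : Int) + 1) + 1 by ring, h, List.foldl_append]
    simp only [List.foldl]
    ring_nf
    ring_nf at ih
    linarith

lemma fold_eq_closed (p c : Int) :
    (PySem.List.pyRange 1 (c + 1) 1).foldl (fun r i => r + i * p) 0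
      = PySem.Int.floordiv (p * (if c > 0 then c else 0) * ((if c > 0 then c else 0) + 1)) 2 := by
  by_cases hc : c > 0
  · rw [if_pos hc]
    obtain ⟨n, rfl⟩ : ∃ n : Nat, c = (n : Int) := ⟨c.toNat, by omega⟩
    have h2 := two_mul_fold p n
    symm
    rw [PySem.Int.floordiv_eq_iff_of_pos (by norm_num)]
    omega
  · rw [if_neg hc]
    rw [PySem.List.pyRange_one_eq_nil (by omega)]
    simp [PySem.Int.floordiv]

-- ===== VERDICT (by name: the statement is the Claim_ definition above) =====
theorem solution_spec : Claim_equal_solution := by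
  intro price money count _
  show solution price money count = solution_alt price money count
  simp only [solution, solution_alt]
  rw [fold_eq_closed price count]
  generalize PySem.Int.floordiv (price * (if count > 0 then count else 0) * ((if count > 0 then count else 0) + 1)) 2 = q
  simp only [max_def]
  split_ifs <;> omega
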